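-- pv_equiv track=rewrite | github.com/clupasq/tuenti21 | 12/solution.py | find_deadends
-- ===== SOURCE A (Python) =====
-- from collections import deque, defaultdict
--
-- def can_reach_btc(coin, exchanges):
--     seen = set()
--     todo = deque([coin])
--     while len(todo) > 0:
--         crt = todo.popleft()
--         if crt == "BTC":
--             return True
--         seen.add(crt)
--         if crt not in exchanges:
--             continue
--         for cc in exchanges[crt]:
--             if cc not in seen:
--                 todo.append(cc)
--     return False
--
-- def find_deadends(exchanges):
--     deadends = set()
--     for c in exchanges:
--         if c == "BTC":
--             continue
--         if not can_reach_btc(c, exchanges):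
--             deadends.add(c)
--     return deadends
-- ===== SOURCE B (Python) =====
-- from collections import deque
--
-- def find_deadends(exchanges):
--     # Build the reversed graph once, then a single BFS from "BTC" finds every
--     # coin that can reach BTC; the deadends are the remaining coins.
--     rev = {}
--     for c, targets in exchanges.items():
--         for t in targets:
--             rev.setdefault(t, []).append(c)
--     reached = {"BTC"}
--     todo = deque(["BTC"])
--     while todo:
--         v = todo.popleft()
--         for u in rev.get(v, []):
--             if u not in reached:
--                 reached.add(u)
--                 todo.append(u)
--     return {c for c in exchanges if c != "BTC" and c not in reached}
-- ===== Notes on version B (the rewrite author's own statement) =====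
-- stated objective: alternative
-- what changed: A runs a separate BFS from every coin towards BTC; B builds the reversed exchange graph once and runs a single BFS from BTC marking every coin that can reach it, so deadends are the unreached keys (intended as the asymptotically cheaper pass; a timing run could not confirm a measured speed-up, so none is claimed).
import Mathlib
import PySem

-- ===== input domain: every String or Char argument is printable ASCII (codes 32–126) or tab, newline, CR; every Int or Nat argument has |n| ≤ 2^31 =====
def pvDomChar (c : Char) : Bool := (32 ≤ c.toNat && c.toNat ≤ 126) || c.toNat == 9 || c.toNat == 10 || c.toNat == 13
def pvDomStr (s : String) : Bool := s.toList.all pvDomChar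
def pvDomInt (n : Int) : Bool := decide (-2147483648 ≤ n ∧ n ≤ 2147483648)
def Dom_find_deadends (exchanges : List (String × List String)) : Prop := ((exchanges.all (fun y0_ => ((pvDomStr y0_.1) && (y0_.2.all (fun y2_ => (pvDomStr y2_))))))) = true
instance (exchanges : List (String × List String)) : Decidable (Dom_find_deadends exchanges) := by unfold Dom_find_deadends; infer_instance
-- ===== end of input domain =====

-- B replaces A's per-coin BFS towards "BTC" by a single BFS from "BTC" over the
-- reversed exchange graph; deadends are the keys that reverse search never reaches.
-- The `univ`/hypothesis arguments of the loops below are termination plumbing only.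

-- ===== PORT A =====

-- termination plumbing: any neighbour produced by a dict lookup lies in d.values.flatten
theorem pv_mem_getD_mem_flatten (d : PySem.Dict String (List String)) (k x : String)
    (hx : x ∈ d.getD k []) : x ∈ d.values.flatten := by
  cases h : d.get? k with
  | none => rw [PySem.Dict.getD_eq_get?_getD, h] at hx; simp at hx
  | some v =>
    rw [PySem.Dict.getD_eq_get?_getD, h] at hx
    simp only [Option.getD_some] at hx
    exact List.mem_flatten.2
      ⟨v, List.mem_map_of_mem (PySem.Dict.mem_items_of_get?_eq_some (d := d) h), hx⟩

-- termination plumbing: growing the visited set can only shrink the unvisited part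
theorem pv_filter_len_le (univ : List String) (r r' : List String) (h : ∀ x ∈ r, x ∈ r') :
    (univ.filter (fun x => !PySem.Set.contains r' x)).length ≤
      (univ.filter (fun x => !PySem.Set.contains r x)).length := by
  refine List.Sublist.length_le (List.monotone_filter_right univ ?_)
  intro a ha
  simp only [PySem.Set.contains_eq_listContains, Bool.not_eq_true', List.contains_eq_mem,
    decide_eq_false_iff_not] at ha ⊢
  exact fun hmem => ha (h a hmem)

theorem pv_filter_len_lt (univ : List String) (r r' : List String) (h : ∀ x ∈ r, x ∈ r')
    (u : String) (hu : u ∈ univ) (hur' : u ∈ r') (hur : u ∉ r) :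
    (univ.filter (fun x => !PySem.Set.contains r' x)).length <
      (univ.filter (fun x => !PySem.Set.contains r x)).length := by
  have hsub : List.Sublist (univ.filter (fun x => !PySem.Set.contains r' x))
      (univ.filter (fun x => !PySem.Set.contains r x)) := by
    refine List.monotone_filter_right univ ?_
    intro a ha
    simp only [PySem.Set.contains_eq_listContains, Bool.not_eq_true', List.contains_eq_mem,
      decide_eq_false_iff_not] at ha ⊢
    exact fun hmem => ha (h a hmem)
  have hne : univ.filter (fun x => !PySem.Set.contains r' x) ≠
      univ.filter (fun x => !PySem.Set.contains r x) := by
    intro heq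
    have h1 : u ∈ univ.filter (fun x => !PySem.Set.contains r x) := by
      simp only [List.mem_filter, PySem.Set.contains_eq_listContains, Bool.not_eq_true',
        List.contains_eq_mem, decide_eq_false_iff_not]
      exact ⟨hu, hur⟩
    rw [← heq] at h1
    simp only [List.mem_filter, PySem.Set.contains_eq_listContains, Bool.not_eq_true',
      List.contains_eq_mem, decide_eq_false_iff_not] at h1
    exact h1.2 hur'
  rcases Nat.lt_or_ge (univ.filter (fun x => !PySem.Set.contains r' x)).length
      (univ.filter (fun x => !PySem.Set.contains r x)).length with h1 | h1
  · exact h1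
  · exact absurd (hsub.eq_of_length (le_antisymm hsub.length_le h1)) hne

-- termination plumbing: appending only-unseen elements cannot lengthen the seen prefix
theorem pv_takeWhile_append_le (p : String → Bool) (l₁ l₂ : List String)
    (h : ∀ x ∈ l₂, p x = false) :
    (List.takeWhile p (l₁ ++ l₂)).length ≤ (List.takeWhile p l₁).length := by
  induction l₁ with
  | nil =>
    simp only [List.nil_append, List.takeWhile_nil, List.length_nil]
    cases l₂ with
    | nil => simp
    | cons a t => simp [h a List.mem_cons_self]
  | cons a t ih =>
    cases hpa : p a <;> simp [hpa, ih]

-- the while-loop of can_reach_btc (A): FIFO queue `todo`, visited set `seen`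
def bfsA (d : PySem.Dict String (List String)) (univ : List String)
    (hd : ∀ k : String, ∀ cc ∈ d.getD k [], cc ∈ univ)
    (seen : PySem.Set String) (todo : List String)
    (h : ∀ x ∈ todo, x ∈ univ) : Bool :=
  match todo with
  | [] => false
  | crt :: rest =>
    if crt = "BTC" then true
    else
      bfsA d univ hd (PySem.Set.add seen crt)
        (rest ++ (d.getD crt []).filter (fun cc => !PySem.Set.contains (PySem.Set.add seen crt) cc))
        (fun x hx => by
          rcases List.mem_append.mp hx with h1 | h2
          · exact h x (List.mem_cons_of_mem _ h1)
          · exact hd crt x (List.mem_of_mem_filter h2))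
termination_by ((univ.filter (fun x => !PySem.Set.contains seen x)).length,
  (todo.takeWhile (fun x => PySem.Set.contains seen x)).length)
decreasing_by
  by_cases hc : crt ∈ seen
  · rw [PySem.Set.add_of_mem hc]
    apply Prod.Lex.right
    have hle : (List.takeWhile (fun x => PySem.Set.contains seen x)
        (rest ++ (d.getD crt []).filter (fun cc => !PySem.Set.contains seen cc))).length ≤
        (List.takeWhile (fun x => PySem.Set.contains seen x) rest).length := by
      apply pv_takeWhile_append_le
      intro x hx
      have hxf := List.of_mem_filter hx
      simpa using hxf
    have hcons : List.takeWhile (fun x => PySem.Set.contains seen x) (crt :: rest) =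
        crt :: List.takeWhile (fun x => PySem.Set.contains seen x) rest := by
      rw [List.takeWhile_cons_of_pos]
      exact (PySem.Set.contains_iff _ _).mpr hc
    rw [hcons]
    simpa using Nat.lt_succ_of_le hle
  · apply Prod.Lex.left
    exact pv_filter_len_lt univ seen (PySem.Set.add seen crt)
      (fun x hx => (PySem.Set.mem_add _ _ _).2 (Or.inl hx)) crt (h crt List.mem_cons_self)
      ((PySem.Set.mem_add _ _ _).2 (Or.inr rfl)) hc

def canReachBtc (coin : String) (d : PySem.Dict String (List String)) : Bool :=
  bfsA d (coin :: d.values.flatten)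
    (fun k cc hcc => List.mem_cons_of_mem _ (pv_mem_getD_mem_flatten d k cc hcc))
    PySem.Set.empty [coin]
    (fun x hx => by rw [List.mem_singleton] at hx; exact hx ▸ List.mem_cons_self)

def find_deadends (exchanges : List (String × List String)) : List String :=
  (PySem.Dict.ofList exchanges).keys.foldl
    (fun deadends c =>
      if c = "BTC" then deadends
      else if !canReachBtc c (PySem.Dict.ofList exchanges) then PySem.Set.add deadends c
      else deadends)
    PySem.Set.empty

-- ===== PORT B =====

-- rev.setdefault(t, []).append(c)  ==  rev.modify t [] (· ++ [c])  (exact: same dict)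
def revGraph (d : PySem.Dict String (List String)) : PySem.Dict String (List String) :=
  d.items.foldl (fun rev p => p.2.foldl (fun rev t => rev.modify t [] (· ++ [p.1])) rev)
    PySem.Dict.empty

-- body of B's inner `for u in rev.get(v, [])` loop
def bfsBStep (st : PySem.Set String × List String) (u : String) :
    PySem.Set String × List String :=
  if PySem.Set.contains st.1 u then st else (PySem.Set.add st.1 u, st.2 ++ [u])

-- termination plumbing for bfsB: the inner loop only grows `reached`, and either
-- leaves the state unchanged or strictly shrinks the unreached part of univ
theorem pv_foldB_mono (l : List String) (r : PySem.Set String) (t : List String) :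
    ∀ x ∈ r, x ∈ (l.foldl bfsBStep (r, t)).1 := by
  induction l generalizing r t with
  | nil => exact fun x hx => hx
  | cons u l ih =>
    intro x hx
    simp only [List.foldl_cons]
    by_cases hc : PySem.Set.contains r u = true
    · simp only [bfsBStep, hc, if_pos]
      exact ih r t x hx
    · simp only [bfsBStep, hc, Bool.false_eq_true, if_neg, not_false_iff]
      exact ih _ _ x ((PySem.Set.mem_add _ _ _).2 (Or.inl hx))

theorem pv_foldB_term (univ : List String) (l : List String) :
    ∀ (r : PySem.Set String) (t : List String), (∀ u ∈ l, u ∈ univ) →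
    (l.foldl bfsBStep (r, t) = (r, t) ∨
      ((univ.filter (fun x => !PySem.Set.contains (l.foldl bfsBStep (r, t)).1 x)).length <
        (univ.filter (fun x => !PySem.Set.contains r x)).length)) := by
  induction l with
  | nil => exact fun r t _ => Or.inl rfl
  | cons u l ih =>
    intro r t hl
    simp only [List.foldl_cons]
    by_cases hc : PySem.Set.contains r u = true
    · simpa only [bfsBStep, hc, if_pos] using ih r t (fun x hx => hl x (List.mem_cons_of_mem _ hx))
    · right
      simp only [bfsBStep, hc, Bool.false_eq_true, if_neg, not_false_iff]
      have hur : u ∉ r := fun hmem => hc ((PySem.Set.contains_iff _ _).mpr hmem)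
      have hlt : (univ.filter (fun x => !PySem.Set.contains (PySem.Set.add r u) x)).length <
          (univ.filter (fun x => !PySem.Set.contains r x)).length :=
        pv_filter_len_lt univ r (PySem.Set.add r u)
          (fun x hx => (PySem.Set.mem_add _ _ _).2 (Or.inl hx)) u (hl u List.mem_cons_self)
          ((PySem.Set.mem_add _ _ _).2 (Or.inr rfl)) hur
      have hle : (univ.filter (fun x =>
          !PySem.Set.contains (l.foldl bfsBStep (PySem.Set.add r u, t ++ [u])).1 x)).length ≤
          (univ.filter (fun x => !PySem.Set.contains (PySem.Set.add r u) x)).length :=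
        pv_filter_len_le univ _ _ (pv_foldB_mono l _ _)
      exact lt_of_le_of_lt hle hlt

-- the while-loop of B: BFS from "BTC" over the reversed graph
def bfsB (rev : PySem.Dict String (List String)) (univ : List String)
    (hrev : ∀ k : String, ∀ u ∈ rev.getD k [], u ∈ univ)
    (reached : PySem.Set String) (todo : List String) : PySem.Set String :=
  match todo with
  | [] => reached
  | v :: rest =>
    bfsB rev univ hrev ((rev.getD v []).foldl bfsBStep (reached, rest)).1
      ((rev.getD v []).foldl bfsBStep (reached, rest)).2
termination_by ((univ.filter (fun x => !PySem.Set.contains reached x)).length, todo.length)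
decreasing_by
  rcases pv_foldB_term univ (rev.getD v []) reached rest (hrev v) with heq | hlt
  · rw [heq]
    exact Prod.Lex.right _ (Nat.lt_succ_self _)
  · exact Prod.Lex.left _ _ hlt

def find_deadends_alt (exchanges : List (String × List String)) : List String :=
  PySem.Set.ofList
    (((PySem.Dict.ofList exchanges).keys).filter
      (fun c => decide (c ≠ "BTC") &&
        !PySem.Set.contains
          (bfsB (revGraph (PySem.Dict.ofList exchanges))
            ("BTC" :: (revGraph (PySem.Dict.ofList exchanges)).values.flatten)
            (fun k u hu => List.mem_cons_of_mem _
              (pv_mem_getD_mem_flatten (revGraph (PySem.Dict.ofList exchanges)) k u hu))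
            (PySem.Set.add PySem.Set.empty "BTC") ["BTC"]) c))

-- ===== PRECONDITION & SPEC =====
def Spec_find_deadends (exchanges : List (String × List String)) (out : List String) : Prop := out = find_deadends_alt exchanges
instance (exchanges : List (String × List String)) (out : List String) : Decidable (Spec_find_deadends exchanges out) := by unfold Spec_find_deadends; infer_instance

-- ===== CLAIM (what is proved, stated in full; the proofs are below) =====
def Claim_equal_find_deadends : Prop := ∀ (exchanges : List (String × List String)), Dom_find_deadends exchanges → Spec_find_deadends exchanges (find_deadends exchanges)

-- ===== LEMMAS AND PROOFS =====

-- reachability along dict edges: y is an exchange target reachable from x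
def pvReach (d : PySem.Dict String (List String)) : String → String → Prop :=
  Relation.ReflTransGen (fun x y => y ∈ d.getD x [])

-- a set containing coin and closed under neighbours contains everything reachable
theorem pv_reach_closed (nbr : String → List String) (S : List String) (coin x : String)
    (hcoin : coin ∈ S) (hcl : ∀ v ∈ S, ∀ w ∈ nbr v, w ∈ S)
    (hr : Relation.ReflTransGen (fun a b => b ∈ nbr a) coin x) : x ∈ S := by
  induction hr with
  | refl => exact hcoin
  | tail hab hbc ih => exact hcl _ ih _ hbc

theorem bfsA_true_iff (d : PySem.Dict String (List String)) (univ : List String)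
    (hd : ∀ k : String, ∀ cc ∈ d.getD k [], cc ∈ univ) (coin : String) :
    ∀ (seen : PySem.Set String) (todo : List String) (h : ∀ x ∈ todo, x ∈ univ),
    (∀ x ∈ todo, pvReach d coin x) →
    (∀ v ∈ seen, v ≠ "BTC" ∧ ∀ w ∈ d.getD v [], w ∈ seen ∨ w ∈ todo) →
    (coin ∈ seen ∨ coin ∈ todo) →
    (bfsA d univ hd seen todo h = true ↔ pvReach d coin "BTC") := by
  intro seen todo h
  fun_induction bfsA d univ hd seen todo h with
  | case1 seen h _hdup =>
    intro _hsound hcl hcoin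
    have hcoinS : coin ∈ seen := by
      rcases hcoin with hs | ht
      · exact hs
      · simp at ht
    constructor
    · intro hf; simp at hf
    · intro hr
      have hBTC : "BTC" ∈ seen := by
        refine pv_reach_closed (fun k => d.getD k []) seen coin "BTC" hcoinS ?_ hr
        intro v hv w hw
        rcases (hcl v hv).2 w hw with h1 | h1
        · exact h1
        · simp at h1
      exact ((hcl "BTC" hBTC).1 rfl).elim
  | case2 seen rest h _hdup =>
    intro hsound _hcl _hcoin
    simp only [true_iff]
    exact hsound "BTC" List.mem_cons_self
  | case3 seen crt rest h hbtc _hdup ih =>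
    intro hsound hcl hcoin
    apply ih
    · -- soundness for the new queue
      intro x hx
      rcases List.mem_append.mp hx with hx | hx
      · exact hsound x (List.mem_cons_of_mem _ hx)
      · exact (hsound crt List.mem_cons_self).tail (List.mem_of_mem_filter hx)
    · -- closure for the new seen set
      intro v hv
      rcases (PySem.Set.mem_add _ _ _).1 hv with hv | rfl
      · refine ⟨(hcl v hv).1, ?_⟩
        intro w hw
        rcases (hcl v hv).2 w hw with h1 | h1
        · exact Or.inl ((PySem.Set.mem_add _ _ _).2 (Or.inl h1))
        · rcases List.mem_cons.mp h1 with rfl | h1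
          · exact Or.inl ((PySem.Set.mem_add _ _ _).2 (Or.inr rfl))
          · exact Or.inr (List.mem_append_left _ h1)
      · refine ⟨hbtc, ?_⟩
        intro w hw
        by_cases hws : w ∈ PySem.Set.add seen v
        · exact Or.inl hws
        · refine Or.inr (List.mem_append_right _ (List.mem_filter.2 ⟨hw, ?_⟩))
          simp only [PySem.Set.contains_eq_listContains, Bool.not_eq_true', List.contains_eq_mem,
            decide_eq_false_iff_not]
          exact hws
    · -- coin stays covered
      rcases hcoin with hs | ht
      · exact Or.inl ((PySem.Set.mem_add _ _ _).2 (Or.inl hs))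
      · rcases List.mem_cons.mp ht with rfl | ht
        · exact Or.inl ((PySem.Set.mem_add _ _ _).2 (Or.inr rfl))
        · exact Or.inr (List.mem_append_left _ ht)

theorem canReachBtc_iff (coin : String) (d : PySem.Dict String (List String)) :
    canReachBtc coin d = true ↔ pvReach d coin "BTC" := by
  unfold canReachBtc
  refine bfsA_true_iff d _ _ coin PySem.Set.empty [coin] _ ?_ ?_ ?_
  · intro x hx
    rw [List.mem_singleton] at hx
    exact hx ▸ Relation.ReflTransGen.refl
  · intro v hv
    simp [PySem.Set.empty] at hv
  · exact Or.inr List.mem_cons_self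

theorem pv_foldB_inv (l : List String) :
    ∀ (r : PySem.Set String) (t : List String), (∀ y ∈ t, y ∈ r) →
    ((∀ x ∈ r, x ∈ (l.foldl bfsBStep (r, t)).1) ∧
     (∀ x ∈ (l.foldl bfsBStep (r, t)).1, x ∈ r ∨ x ∈ l) ∧
     (∀ u ∈ l, u ∈ (l.foldl bfsBStep (r, t)).1) ∧
     (∀ y ∈ t, y ∈ (l.foldl bfsBStep (r, t)).2) ∧
     (∀ x ∈ (l.foldl bfsBStep (r, t)).1, x ∈ r ∨ x ∈ (l.foldl bfsBStep (r, t)).2) ∧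
     (∀ y ∈ (l.foldl bfsBStep (r, t)).2, y ∈ (l.foldl bfsBStep (r, t)).1)) := by
  induction l with
  | nil =>
    intro r t ht
    exact ⟨fun x hx => hx, fun x hx => Or.inl hx, by simp, fun y hy => hy,
      fun x hx => Or.inl hx, ht⟩
  | cons u l ih =>
    intro r t ht
    simp only [List.foldl_cons]
    by_cases hc : PySem.Set.contains r u = true
    · have hur : u ∈ r := (PySem.Set.contains_iff _ _).mp hc
      have hstep : bfsBStep (r, t) u = (r, t) := by simp [bfsBStep, hur]
      rw [hstep]
      obtain ⟨ha, hb, hcX, hd', he, hf⟩ := ih r t ht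
      refine ⟨ha, fun x hx => (hb x hx).imp id (List.mem_cons_of_mem _), ?_, hd', he, hf⟩
      intro w hw
      rcases List.mem_cons.mp hw with rfl | hw
      · exact ha w hur
      · exact hcX w hw
    · have hur : u ∉ r := fun hmem => hc ((PySem.Set.contains_iff _ _).mpr hmem)
      have hstep : bfsBStep (r, t) u = (PySem.Set.add r u, t ++ [u]) := by
        simp [bfsBStep, hur]
      rw [hstep]
      have ht' : ∀ y ∈ t ++ [u], y ∈ PySem.Set.add r u := by
        intro y hy
        rcases List.mem_append.mp hy with hy | hy
        · exact (PySem.Set.mem_add _ _ _).2 (Or.inl (ht y hy))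
        · rw [List.mem_singleton] at hy
          exact hy ▸ (PySem.Set.mem_add _ _ _).2 (Or.inr rfl)
      obtain ⟨ha, hb, hcX, hd', he, hf⟩ := ih (PySem.Set.add r u) (t ++ [u]) ht'
      refine ⟨?_, ?_, ?_, ?_, ?_, hf⟩
      · exact fun x hx => ha x ((PySem.Set.mem_add _ _ _).2 (Or.inl hx))
      · intro x hx
        rcases hb x hx with hx' | hx'
        · rcases (PySem.Set.mem_add _ _ _).1 hx' with h1 | rfl
          · exact Or.inl h1
          · exact Or.inr List.mem_cons_self
        · exact Or.inr (List.mem_cons_of_mem _ hx')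
      · intro w hw
        rcases List.mem_cons.mp hw with rfl | hw
        · exact ha w ((PySem.Set.mem_add _ _ _).2 (Or.inr rfl))
        · exact hcX w hw
      · exact fun y hy => hd' y (List.mem_append_left _ hy)
      · intro x hx
        rcases he x hx with hx' | hx'
        · rcases (PySem.Set.mem_add _ _ _).1 hx' with h1 | rfl
          · exact Or.inl h1
          · exact Or.inr (hd' x (List.mem_append_right _ List.mem_cons_self))
        · exact Or.inr hx'

theorem bfsB_mem_iff (rev : PySem.Dict String (List String)) (univ : List String)
    (hrev : ∀ k : String, ∀ u ∈ rev.getD k [], u ∈ univ) (x : String) :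
    ∀ (reached : PySem.Set String) (todo : List String),
    "BTC" ∈ reached →
    (∀ y ∈ reached, Relation.ReflTransGen (fun a b => b ∈ rev.getD a []) "BTC" y) →
    (∀ y ∈ todo, y ∈ reached) →
    (∀ v ∈ reached, v ∈ todo ∨ ∀ u ∈ rev.getD v [], u ∈ reached) →
    (x ∈ bfsB rev univ hrev reached todo ↔
      Relation.ReflTransGen (fun a b => b ∈ rev.getD a []) "BTC" x) := by
  intro reached todo
  fun_induction bfsB rev univ hrev reached todo with
  | case1 reached =>
    intro J1 J2 J3 J4
    constructor
    · exact J2 x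
    · intro hr
      refine pv_reach_closed (fun k => rev.getD k []) reached "BTC" x J1 ?_ hr
      intro v hv
      rcases J4 v hv with hmem | hclosed
      · simp at hmem
      · exact hclosed
  | case2 reached v rest ih =>
    intro J1 J2 J3 J4
    obtain ⟨ha, hb, hcX, hd', he, hf⟩ :=
      pv_foldB_inv (rev.getD v []) reached rest (fun y hy => J3 y (List.mem_cons_of_mem _ hy))
    apply ih
    · exact ha _ J1
    · intro y hy
      rcases hb y hy with hy' | hy'
      · exact J2 y hy'
      · exact (J2 v (J3 v List.mem_cons_self)).tail hy'
    · exact hf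
    · intro v' hv'
      rcases he v' hv' with hv'' | hv''
      · rcases J4 v' hv'' with hmem | hclosed
        · rcases List.mem_cons.mp hmem with rfl | hmem
          · exact Or.inr (fun u hu => hcX u hu)
          · exact Or.inl (hd' v' hmem)
        · exact Or.inr (fun u hu => ha u (hclosed u hu))
      · exact Or.inl hv''

theorem pv_mem_getD_iff (d : PySem.Dict String (List String)) (hnd : d.keys.Nodup)
    (u v : String) : v ∈ d.getD u [] ↔ ∃ p ∈ d.items, v ∈ p.2 ∧ p.1 = u := by
  cases h : d.get? u with
  | none =>
    rw [PySem.Dict.getD_eq_get?_getD, h]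
    simp only [Option.getD_none, List.not_mem_nil, false_iff]
    rintro ⟨p, hp, _hv, hpu⟩
    have hp' : (p.1, p.2) ∈ d.items := by simpa using hp
    have h2 := PySem.Dict.get?_of_mem_items _ hp' hnd
    rw [hpu, h] at h2
    cases h2
  | some ts =>
    rw [PySem.Dict.getD_eq_get?_getD, h]
    simp only [Option.getD_some]
    constructor
    · intro hv
      exact ⟨(u, ts), PySem.Dict.mem_items_of_get?_eq_some (d := d) h, hv, rfl⟩
    · rintro ⟨p, hp, hv, hpu⟩
      have hp' : (p.1, p.2) ∈ d.items := by simpa using hp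
      have h2 := PySem.Dict.get?_of_mem_items _ hp' hnd
      rw [hpu, h] at h2
      exact (Option.some.inj h2) ▸ hv

theorem pv_mem_revGraph (d : PySem.Dict String (List String)) (hnd : d.keys.Nodup)
    (u v : String) : u ∈ (revGraph d).getD v [] ↔ v ∈ d.getD u [] := by
  have h1 : revGraph d = (d.items.flatMap (fun p => p.2.map (fun t => (t, p.1)))).foldl
      (fun rev q => rev.modify q.1 [] (· ++ [q.2])) PySem.Dict.empty := by
    rw [List.foldl_flatMap]
    unfold revGraph
    congr 1
    funext rev p
    rw [List.foldl_map]
  rw [h1, PySem.Dict.getD_foldl_modify_append, pv_mem_getD_iff d hnd u v]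
  simp only [PySem.Dict.getD_empty, List.nil_append, List.mem_map, List.mem_filter,
    List.mem_flatMap, beq_iff_eq]
  constructor
  · rintro ⟨q, ⟨⟨p, hp, t, ht, rfl⟩, hq⟩, hq2⟩
    exact ⟨p, hp, hq ▸ ht, hq2⟩
  · rintro ⟨p, hp, hv, hpu⟩
    exact ⟨(v, p.1), ⟨⟨p, hp, v, hv, rfl⟩, rfl⟩, hpu⟩

theorem pv_rev_reach_iff (d : PySem.Dict String (List String)) (hnd : d.keys.Nodup)
    (x : String) :
    Relation.ReflTransGen (fun a b => b ∈ (revGraph d).getD a []) "BTC" x ↔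
      pvReach d x "BTC" := by
  constructor
  · intro hr
    have h1 : Relation.ReflTransGen
        (Function.swap (fun a b => b ∈ (revGraph d).getD a [])) x "BTC" :=
      Relation.reflTransGen_swap.mpr hr
    exact Relation.ReflTransGen.mono
      (fun a b hab => (pv_mem_revGraph d hnd a b).mp hab) h1
  · intro hr
    have h1 : Relation.ReflTransGen
        (Function.swap (fun x y => y ∈ d.getD x [])) "BTC" x :=
      Relation.reflTransGen_swap.mpr hr
    exact Relation.ReflTransGen.mono
      (fun a b hab => (pv_mem_revGraph d hnd b a).mpr hab) h1

theorem pv_reached_iff (d : PySem.Dict String (List String)) (hnd : d.keys.Nodup)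
    (univ : List String) (hrev : ∀ k : String, ∀ u ∈ (revGraph d).getD k [], u ∈ univ)
    (x : String) :
    (x ∈ bfsB (revGraph d) univ hrev (PySem.Set.add PySem.Set.empty "BTC") ["BTC"] ↔
      pvReach d x "BTC") := by
  have hBTCmem : "BTC" ∈ PySem.Set.add PySem.Set.empty "BTC" :=
    (PySem.Set.mem_add _ _ _).2 (Or.inr rfl)
  have hJ2 : ∀ y ∈ PySem.Set.add PySem.Set.empty "BTC",
      Relation.ReflTransGen (fun a b => b ∈ (revGraph d).getD a []) "BTC" y := by
    intro y hy
    rcases (PySem.Set.mem_add _ _ _).1 hy with hy | rfl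
    · simp [PySem.Set.empty] at hy
    · exact Relation.ReflTransGen.refl
  have hJ3 : ∀ y ∈ (["BTC"] : List String), y ∈ PySem.Set.add PySem.Set.empty "BTC" := by
    intro y hy
    rw [List.mem_singleton] at hy
    exact hy ▸ hBTCmem
  have hJ4 : ∀ v ∈ PySem.Set.add PySem.Set.empty "BTC",
      v ∈ (["BTC"] : List String) ∨ ∀ u ∈ (revGraph d).getD v [], u ∈ PySem.Set.add PySem.Set.empty "BTC" := by
    intro v hv
    rcases (PySem.Set.mem_add _ _ _).1 hv with hv | rfl
    · simp [PySem.Set.empty] at hv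
    · exact Or.inl List.mem_cons_self
  rw [bfsB_mem_iff (revGraph d) univ hrev x (PySem.Set.add PySem.Set.empty "BTC") ["BTC"]
    hBTCmem hJ2 hJ3 hJ4]
  exact pv_rev_reach_iff d hnd x

theorem pv_stepA_eq (d : PySem.Dict String (List String)) :
    (fun (deadends : PySem.Set String) c =>
      if c = "BTC" then deadends
      else if !canReachBtc c d then PySem.Set.add deadends c
      else deadends) =
    (fun (deadends : PySem.Set String) c =>
      if (decide (c ≠ "BTC") && !canReachBtc c d) then PySem.Set.add deadends c
      else deadends) := by
  funext s c
  by_cases hc : c = "BTC"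
  · simp [hc]
  · cases h2 : canReachBtc c d <;> simp [hc]

theorem pv_foldl_add_filter (q : String → Bool) (l : List String) :
    ∀ (acc : PySem.Set String), l.Nodup → (∀ x ∈ l, x ∉ acc) →
    l.foldl (fun s c => if q c then PySem.Set.add s c else s) acc = acc ++ l.filter q := by
  induction l with
  | nil => intro acc _ _; simp
  | cons c l ih =>
    intro acc hnd hfresh
    simp only [List.foldl_cons, List.filter_cons]
    cases hq : q c with
    | false =>
      rw [if_neg (by simp), if_neg (by simp),
        ih acc (List.Nodup.of_cons hnd) (fun x hx => hfresh x (List.mem_cons_of_mem _ hx))]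
    | true =>
      have hfr : ∀ x ∈ l, x ∉ acc ++ [c] := by
        intro x hx hmem
        rcases List.mem_append.mp hmem with hx' | hx'
        · exact hfresh x (List.mem_cons_of_mem _ hx) hx'
        · rw [List.mem_singleton] at hx'
          exact (List.nodup_cons.mp hnd).1 (hx' ▸ hx)
      rw [if_pos rfl, if_pos rfl, PySem.Set.add_of_not_mem (hfresh c List.mem_cons_self),
        ih (acc ++ [c]) (List.Nodup.of_cons hnd) hfr, List.append_assoc, List.singleton_append]

-- ===== VERDICT (by name: the statement is the Claim_ definition above) =====
theorem find_deadends_spec : Claim_equal_find_deadends := by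
  intro exchanges _hdom
  unfold Spec_find_deadends find_deadends find_deadends_alt
  have hnd : (PySem.Dict.ofList exchanges).keys.Nodup := PySem.Dict.nodup_keys_ofList exchanges
  rw [pv_stepA_eq (PySem.Dict.ofList exchanges),
    pv_foldl_add_filter _ _ PySem.Set.empty hnd (fun x _ => by simp [PySem.Set.empty]),
    show (PySem.Set.empty : PySem.Set String) = ([] : List String) from rfl,
    List.nil_append]
  have hcongr : ∀ c ∈ (PySem.Dict.ofList exchanges).keys,
      (decide (c ≠ "BTC") && !canReachBtc c (PySem.Dict.ofList exchanges)) =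
      (decide (c ≠ "BTC") &&
        !PySem.Set.contains
          (bfsB (revGraph (PySem.Dict.ofList exchanges))
            ("BTC" :: (revGraph (PySem.Dict.ofList exchanges)).values.flatten)
            (fun k u hu => List.mem_cons_of_mem _
              (pv_mem_getD_mem_flatten (revGraph (PySem.Dict.ofList exchanges)) k u hu))
            (PySem.Set.add PySem.Set.empty "BTC") ["BTC"]) c) := by
    intro c _hc
    have h1 := canReachBtc_iff c (PySem.Dict.ofList exchanges)
    have h2 := pv_reached_iff (PySem.Dict.ofList exchanges) hnd
      ("BTC" :: (revGraph (PySem.Dict.ofList exchanges)).values.flatten)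
      (fun k u hu => List.mem_cons_of_mem _
        (pv_mem_getD_mem_flatten (revGraph (PySem.Dict.ofList exchanges)) k u hu)) c
    have hiff : (canReachBtc c (PySem.Dict.ofList exchanges) = true) ↔
        (PySem.Set.contains
          (bfsB (revGraph (PySem.Dict.ofList exchanges))
            ("BTC" :: (revGraph (PySem.Dict.ofList exchanges)).values.flatten)
            (fun k u hu => List.mem_cons_of_mem _
              (pv_mem_getD_mem_flatten (revGraph (PySem.Dict.ofList exchanges)) k u hu))
            (PySem.Set.add PySem.Set.empty "BTC") ["BTC"]) c = true) :=
      (h1.trans h2.symm).trans (PySem.Set.contains_iff _ _).symm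
    have h3 := Bool.eq_iff_iff.mpr hiff
    rw [h3]
  rw [List.filter_congr hcongr]
  exact (PySem.Set.ofList_eq_self_of_nodup _ (List.Nodup.filter _ hnd)).symm
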